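-- pv_equiv track=rewrite | github.com/dstiefe/medsyncai_agentic_backend | app/agents/clinical/ais_clinical_engine/agents/qa/orchestrator_v2.py | _merge_clarification_context
-- ===== SOURCE A (Python) =====
-- from typing import Any, Dict, List, Optional
--
-- def _merge_clarification_context(
--     question: str, history: List[Dict[str, Any]],
-- ) -> str:
--     """If the previous assistant turn was a clarification, merge the
--     original question with the current reply so the parser has full
--     context. Otherwise return the question unchanged.
--     """
--     if not history:
--         return question
--     # Walk backwards looking for the most recent clarification ask
--     # and the user question that triggered it.
--     for i in range(len(history) - 1, -1, -1):
--         turn = history[i]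
--         if (
--             turn.get("role") == "assistant"
--             and turn.get("type") == "clarification"
--         ):
--             # The user turn immediately before this clarification is
--             # the original question we need to merge with.
--             for j in range(i - 1, -1, -1):
--                 prior = history[j]
--                 if prior.get("role") == "user":
--                     original = prior.get("content") or ""
--                     if original:
--                         return f"{original} — clarification: {question}"
--                     break
--             break
--     return question
-- ===== SOURCE B (Python) =====
-- def _merge_clarification_context(question, history):
--     """One forward pass: track the nearest prior user content and overwrite
--     a candidate merge at every clarification turn (last clarification wins)."""
--     candidate = None
--     last_user = ""
--     for turn in history:
--         if turn.get("role") == "assistant" and turn.get("type") == "clarification":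
--             candidate = (
--                 f"{last_user} — clarification: {question}" if last_user else question
--             )
--         elif turn.get("role") == "user":
--             last_user = turn.get("content") or ""
--     return candidate if candidate is not None else question
-- ===== Notes on version B (the rewrite author's own statement) =====
-- stated objective: simpler
-- what changed: Replaces the two nested backward index scans (find last clarification, then scan back again for the prior user turn) with a single forward pass that maintains the most recent user content and overwrites a merge candidate at each clarification.
import Mathlib
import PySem

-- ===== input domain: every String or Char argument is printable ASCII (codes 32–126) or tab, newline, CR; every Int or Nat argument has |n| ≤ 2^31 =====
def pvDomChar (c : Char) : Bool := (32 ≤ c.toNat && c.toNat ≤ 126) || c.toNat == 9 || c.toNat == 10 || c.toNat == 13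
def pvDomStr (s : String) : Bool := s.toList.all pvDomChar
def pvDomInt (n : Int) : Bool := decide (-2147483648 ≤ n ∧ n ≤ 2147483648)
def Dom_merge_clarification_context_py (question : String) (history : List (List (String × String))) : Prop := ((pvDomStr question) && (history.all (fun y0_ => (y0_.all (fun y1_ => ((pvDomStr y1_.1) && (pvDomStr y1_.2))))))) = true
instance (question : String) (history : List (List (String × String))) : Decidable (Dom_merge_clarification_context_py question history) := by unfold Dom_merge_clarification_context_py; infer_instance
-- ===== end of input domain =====

-- B replaces A's two nested backward index scans with one forward pass (simpler, one traversal); return values agree everywhere.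

-- ===== PORT A =====
-- history[i] (index always in range in A's loops; getD [] only for totality)
def pvTurnAt (history : List (List (String × String))) (i : Int) : List (String × String) :=
  (PySem.List.pyGet? history i).getD []

-- turn.get("role") == "assistant" and turn.get("type") == "clarification"
def pvIsClar (turn : List (String × String)) : Bool :=
  (List.lookup "role" turn == some "assistant") && (List.lookup "type" turn == some "clarification")

-- inner loop: for j in range(i-1, -1, -1): …  (returns the merged string or falls through to `return question`)
def pvInnerA (question : String) (history : List (List (String × String))) : List Int → String
  | [] => question
  | j :: rest =>
    let prior := pvTurnAt history j
    if List.lookup "role" prior == some "user" then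
      let original := (List.lookup "content" prior).getD ""
      if original ≠ "" then original ++ " — clarification: " ++ question
      else question   -- break → return question
    else pvInnerA question history rest

-- outer loop: for i in range(len(history)-1, -1, -1): …
def pvOuterA (question : String) (history : List (List (String × String))) : List Int → String
  | [] => question
  | i :: rest =>
    let turn := pvTurnAt history i
    if pvIsClar turn then
      pvInnerA question history (PySem.List.pyRange (i - 1) (-1) (-1))   -- then break → return question (pvInnerA returns it)
    else pvOuterA question history rest

def merge_clarification_context_py (question : String) (history : List (List (String × String))) : String :=
  if history.isEmpty then question
  else pvOuterA question history (PySem.List.pyRange ((history.length : Int) - 1) (-1) (-1))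

-- ===== PORT B =====
-- one forward step over a turn: state = (candidate, last_user)
def pvStepB (question : String) (st : Option String × String) (turn : List (String × String)) : Option String × String :=
  if pvIsClar turn then
    (some (if st.2 ≠ "" then st.2 ++ " — clarification: " ++ question else question), st.2)
  else if List.lookup "role" turn == some "user" then
    (st.1, (List.lookup "content" turn).getD "")
  else st

def merge_clarification_context_py_alt (question : String) (history : List (List (String × String))) : String :=
  ((history.foldl (pvStepB question) (none, "")).1).getD question

-- ===== PRECONDITION & SPEC =====
def Spec_merge_clarification_context_py (question : String) (history : List (List (String × String))) (out : String) : Prop := out = merge_clarification_context_py_alt question history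
instance (question : String) (history : List (List (String × String))) (out : String) : Decidable (Spec_merge_clarification_context_py question history out) := by unfold Spec_merge_clarification_context_py; infer_instance

-- ===== CLAIM (what is proved, stated in full; the proofs are below) =====
def Claim_equal_merge_clarification_context_py : Prop := ∀ (question : String) (history : List (List (String × String))), Dom_merge_clarification_context_py question history → Spec_merge_clarification_context_py question history (merge_clarification_context_py question history)

-- ===== LEMMAS AND PROOFS =====

-- the "last user content" as B maintains it (snd of B's fold state)
def pvLastU (history : List (List (String × String))) : String :=
  history.foldl (fun u t => if pvIsClar t then u
                            else if List.lookup "role" t == some "user" then (List.lookup "content" t).getD ""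
                            else u) ""

theorem pvStepB_snd (q : String) (l : List (List (String × String))) (c : Option String) (u : String) :
    (l.foldl (pvStepB q) (c, u)).2 =
      l.foldl (fun u t => if pvIsClar t then u
                          else if List.lookup "role" t == some "user" then (List.lookup "content" t).getD ""
                          else u) u := by
  induction l generalizing c u with
  | nil => rfl
  | cons t l ih =>
    simp only [List.foldl_cons, pvStepB]
    split_ifs with h1 h2 <;> exact ih _ _

theorem pvIsClar_not_user (t : List (String × String)) (h : pvIsClar t = true) :
    (List.lookup "role" t == some "user") = false := by
  simp only [pvIsClar, Bool.and_eq_true, beq_iff_eq] at h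
  simp [h.1]

theorem pvInnerA_eq (q : String) (history : List (List (String × String))) :
    ∀ (k : Nat), k ≤ history.length →
      pvInnerA q history (PySem.List.pyRange ((k : Int) - 1) (-1) (-1)) =
        (if pvLastU (history.take k) ≠ "" then pvLastU (history.take k) ++ " — clarification: " ++ q else q) := by
  intro k
  induction k with
  | zero =>
    intro _
    rw [PySem.List.pyRange_neg_one_eq_nil (by omega)]
    simp [pvInnerA, pvLastU]
  | succ k ih =>
    intro hk
    have hk' : k < history.length := by omega
    rw [show ((k + 1 : Nat) : Int) - 1 = (k : Int) by push_cast; ring,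
        PySem.List.pyRange_neg_one_cons (by omega)]
    have htake : history.take (k + 1) = history.take k ++ [history[k]] :=
      List.take_succ_eq_append_getElem hk'
    have hturn : pvTurnAt history (k : Int) = history[k] := by
      simp [pvTurnAt, PySem.List.pyGet?_natCast, List.getElem?_eq_getElem hk']
    have hlast : pvLastU (history.take (k + 1)) =
        (if pvIsClar history[k] then pvLastU (history.take k)
         else if List.lookup "role" history[k] == some "user" then (List.lookup "content" history[k]).getD ""
         else pvLastU (history.take k)) := by
      simp only [pvLastU, htake, List.foldl_append, List.foldl_cons, List.foldl_nil]
    by_cases hclar : pvIsClar history[k]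
    · -- clarification turn: role ≠ user, inner loop skips it
      simp only [pvInnerA, hturn, pvIsClar_not_user _ hclar, Bool.false_eq_true, if_false]
      rw [hlast, if_pos hclar]
      exact ih (by omega)
    · by_cases huser : (List.lookup "role" history[k] == some "user") = true
      · simp only [pvInnerA, hturn, huser, if_true]
        rw [hlast, if_neg hclar, if_pos huser]
      · simp only [pvInnerA, hturn, huser, Bool.false_eq_true, if_false]
        rw [hlast, if_neg hclar, if_neg huser]
        exact ih (by omega)

theorem pvOuterA_eq (q : String) (history : List (List (String × String))) :
    ∀ (k : Nat), k ≤ history.length →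
      pvOuterA q history (PySem.List.pyRange ((k : Int) - 1) (-1) (-1)) =
        (((history.take k).foldl (pvStepB q) (none, "")).1).getD q := by
  intro k
  induction k with
  | zero =>
    intro _
    rw [PySem.List.pyRange_neg_one_eq_nil (by omega)]
    simp [pvOuterA]
  | succ k ih =>
    intro hk
    have hk' : k < history.length := by omega
    rw [show ((k + 1 : Nat) : Int) - 1 = (k : Int) by push_cast; ring,
        PySem.List.pyRange_neg_one_cons (by omega)]
    have htake : history.take (k + 1) = history.take k ++ [history[k]] :=
      List.take_succ_eq_append_getElem hk'
    have hturn : pvTurnAt history (k : Int) = history[k] := by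
      simp [pvTurnAt, PySem.List.pyGet?_natCast, List.getElem?_eq_getElem hk']
    have hsnd : ((history.take k).foldl (pvStepB q) (none, "")).2 = pvLastU (history.take k) :=
      pvStepB_snd q _ none ""
    by_cases hclar : pvIsClar history[k]
    · simp only [pvOuterA, hturn, hclar, if_true]
      rw [pvInnerA_eq q history k (by omega), htake]
      simp only [List.foldl_append, List.foldl_cons, List.foldl_nil, pvStepB, hclar, if_true, hsnd]
      simp
    · simp only [pvOuterA, hturn, hclar, Bool.false_eq_true, if_false]
      rw [htake]
      simp only [List.foldl_append, List.foldl_cons, List.foldl_nil, pvStepB, hclar,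
        Bool.false_eq_true, if_false]
      rw [ih (by omega)]
      split_ifs <;> rfl

-- ===== VERDICT (by name: the statement is the Claim_ definition above) =====
theorem merge_clarification_context_py_spec : Claim_equal_merge_clarification_context_py := by
  intro q history _
  unfold Spec_merge_clarification_context_py merge_clarification_context_py
    merge_clarification_context_py_alt
  by_cases hemp : history.isEmpty
  · rw [if_pos hemp]
    rw [List.isEmpty_iff] at hemp
    simp [hemp]
  · rw [if_neg hemp]
    have := pvOuterA_eq q history history.length le_rfl
    rw [List.take_length] at this
    exact this
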